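-- pv_equiv track=rewrite | github.com/junjange/uttug-seuja-algorithm | 조준장/소프티어/Lv.3/[HSAT 3회 정기 코딩 인증평가 기출] 플레이페어 암호.py | message_split
-- ===== SOURCE A (Python) =====
-- def message_split(message):
--     while True:
--         moved = 0
--         for i in range(0, len(message), 2):
--             if i + 1 >= len(message):
--                 break
--             if message[i] == message[i + 1]:
--                 moved += 1
--                 if message[i] == "X":
--                     message.insert(i + 1, "Q")
--                 else:
--                     message.insert(i + 1, "X")
--
--         if moved == 0:
--             break
--
--     if len(message) % 2 != 0:
--         message.append("X")
--
--     group_message = []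
--     for i in range(0, len(message), 2):
--         group_message.append([message[i], message[i + 1]])
--     return group_message
-- ===== SOURCE B (Python) =====
-- def message_split(message):
--     # Single left-to-right pass with one-char pushback: when a pair would be a
--     # duplicate, emit (char, filler) and re-use the duplicate as the start of
--     # the next pair.  Does not mutate `message` (A does; return value only).
--     out = []
--     i = 0
--     n = len(message)
--     while i < n:
--         c = message[i]
--         if i + 1 < n and message[i + 1] == c:
--             out.append([c, "Q" if c == "X" else "X"])
--             i += 1
--         elif i + 1 < n:
--             out.append([c, message[i + 1]])
--             i += 2
--         else:
--             out.append([c, "X"])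
--             i += 1
--     return out
-- ===== Notes on version B (the rewrite author's own statement) =====
-- stated objective: faster
-- what changed: Replaces A's repeated full rescans with O(n) mid-list inserts (looping until a pass makes no change, then a grouping pass) by one left-to-right index pass that emits each pair directly, pushing the duplicate character back as the start of the next pair; B also does not mutate its argument.
import Mathlib
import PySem

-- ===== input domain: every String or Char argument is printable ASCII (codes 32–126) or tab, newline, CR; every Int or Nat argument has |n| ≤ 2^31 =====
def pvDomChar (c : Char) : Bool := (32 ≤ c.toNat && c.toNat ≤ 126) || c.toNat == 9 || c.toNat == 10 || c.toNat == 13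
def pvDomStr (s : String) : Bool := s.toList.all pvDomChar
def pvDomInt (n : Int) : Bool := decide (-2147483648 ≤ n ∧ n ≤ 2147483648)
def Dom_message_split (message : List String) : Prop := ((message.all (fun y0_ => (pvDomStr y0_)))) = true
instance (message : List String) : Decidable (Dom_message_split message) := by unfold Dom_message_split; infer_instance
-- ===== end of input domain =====

-- B replaces A's repeated rescans with mid-list inserts by one left-to-right pass with
-- one-char pushback (objective: faster). A mutates its argument in place; B does not:
-- the equivalence proved here is about the RETURN value only.

-- ===== PORT A =====
-- adjCount counts adjacent equal pairs; it is the termination measure of A's 'while True' loop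
-- (each insert of a filler between two equal strings strictly decreases it).
def adjCount : List String → Nat
  | a :: b :: t => (if a = b then 1 else 0) + adjCount (b :: t)
  | _ => 0

-- one pass of A's 'for i in range(0, len(message), 2)' over the (mutating) message;
-- len0 is the length of message at loop entry (Python fixes the range there).
-- 'message.getD i ""' is exact: the guards put i and i+1 in range.
def passGo (len0 : Nat) (i : Nat) (msg : List String) (moved : Nat) : List String × Nat :=
  if i < len0 then
    if msg.length ≤ i + 1 then (msg, moved)          -- 'if i + 1 >= len(message): break'
    else if msg.getD i "" = msg.getD (i + 1) "" then
      passGo len0 (i + 2)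
        (PySem.List.insert msg ((i : Int) + 1) (if msg.getD i "" = "X" then "Q" else "X"))
        (moved + 1)
    else passGo len0 (i + 2) msg moved
  else (msg, moved)
termination_by len0 - i

-- A's 'while True' loop, ported with fuel: a pass with moved == 0 returns, and every
-- insert strictly decreases adjCount (the number of adjacent equal pairs), so
-- adjCount msg + 1 iterations always suffice (proved in whileA_expand below).
def whileA : Nat → List String → List String
  | 0, msg => msg
  | fuel + 1, msg =>
      let r := passGo msg.length 0 msg 0
      if r.2 = 0 then r.1 else whileA fuel r.1

-- 'if len(message) % 2 != 0: message.append("X")'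
def padX (l : List String) : List String := if l.length % 2 ≠ 0 then l ++ ["X"] else l

-- final grouping loop 'for i in range(0, len(message), 2): group_message.append(...)';
-- getD is exact: the padded list has even length, so i < len gives i+1 < len.
def groupGo (m : List String) (i : Nat) : List (List String) :=
  if i < m.length then [m.getD i "", m.getD (i + 1) ""] :: groupGo m (i + 2) else []
termination_by m.length - i

def message_split (message : List String) : List (List String) :=
  groupGo (padX (whileA (adjCount message + 1) message)) 0

-- ===== PORT B =====
def altGo (message : List String) (n i : Nat) : List (List String) :=
  if i < n then
    let c := message.getD i ""
    if i + 1 < n ∧ message.getD (i + 1) "" = c then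
      [c, if c = "X" then "Q" else "X"] :: altGo message n (i + 1)
    else if i + 1 < n then
      [c, message.getD (i + 1) ""] :: altGo message n (i + 2)
    else
      [c, "X"] :: altGo message n (i + 1)
  else []
termination_by n - i

def message_split_alt (message : List String) : List (List String) :=
  altGo message message.length 0

-- ===== PRECONDITION & SPEC =====
def Spec_message_split (message : List String) (out : List (List String)) : Prop := out = message_split_alt message
instance (message : List String) (out : List (List String)) : Decidable (Spec_message_split message out) := by unfold Spec_message_split; infer_instance

-- ===== CLAIM (what is proved, stated in full; the proofs are below) =====
def Claim_equal_message_split : Prop := ∀ (message : List String), Dom_message_split message → Spec_message_split message (message_split message)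

-- ===== LEMMAS AND PROOFS =====

theorem adjCount_cons (p : String) (l : List String) :
    adjCount (p :: l) = (if l.head? = some p then 1 else 0) + adjCount l := by
  cases l with
  | nil => simp [adjCount]
  | cons b t => simp [adjCount, eq_comm]

theorem head?_append_cons {α : Type} (pre : List α) (a : α) (l l' : List α) :
    (pre ++ a :: l).head? = (pre ++ a :: l').head? := by
  cases pre <;> simp

theorem adjCount_insert (pre : List String) (a f : String) (suf : List String) (h : f ≠ a) :
    adjCount (pre ++ a :: f :: a :: suf) + 1 = adjCount (pre ++ a :: a :: suf) := by
  induction pre with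
  | nil =>
      simp only [List.nil_append, adjCount, if_neg h, if_neg (Ne.symm h), if_true]
      omega
  | cons p pre ih =>
      rw [List.cons_append, List.cons_append, adjCount_cons, adjCount_cons,
        head?_append_cons pre a (f :: a :: suf) (a :: suf)]
      omega

theorem take_two (msg : List String) (i : Nat) (h : i + 1 < msg.length) :
    msg.take (i + 2) = msg.take i ++ [msg[i], msg[i + 1]] := by
  rw [List.take_succ_eq_append_getElem h,
    List.take_succ_eq_append_getElem (by omega : i < msg.length)]
  simp only [List.append_assoc, List.cons_append, List.nil_append]

theorem insert_decomp (msg : List String) (i : Nat) (f : String) (h : i + 1 < msg.length) :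
    PySem.List.insert msg ((i : Int) + 1) f
      = msg.take i ++ msg[i] :: f :: msg[i + 1] :: msg.drop (i + 2) := by
  have hcast : ((i : Int) + 1) = ((i + 1 : Nat) : Int) := by push_cast; ring
  rw [hcast, PySem.List.insert_natCast msg (i + 1) f (by omega),
    List.take_succ_eq_append_getElem (by omega : i < msg.length),
    List.drop_eq_getElem_cons h]
  simp only [List.append_assoc, List.cons_append, List.nil_append]

theorem msg_decomp (msg : List String) (i : Nat) (h : i + 1 < msg.length) :
    msg = msg.take i ++ msg[i] :: msg[i + 1] :: msg.drop (i + 2) := by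
  conv_lhs => rw [← List.take_append_drop i msg]
  rw [List.drop_eq_getElem_cons (by omega : i < msg.length), List.drop_eq_getElem_cons h]

theorem passGo_conserve (len0 i : Nat) (msg : List String) (moved : Nat) :
    adjCount (passGo len0 i msg moved).1 + (passGo len0 i msg moved).2
      = adjCount msg + moved := by
  induction i, msg, moved using passGo.induct (len0 := len0) with
  | case1 i msg moved h1 h2 => simp [passGo, h1, h2]
  | case2 i msg moved h1 h2 h3 ih =>
      simp only [dite_eq_ite] at ih
      have hi : i < msg.length := by omega
      have hi1 : i + 1 < msg.length := by omega
      have hgi : msg.getD i "" = msg[i] := List.getD_eq_getElem msg "" hi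
      have hgi1 : msg.getD (i + 1) "" = msg[i + 1] := List.getD_eq_getElem msg "" hi1
      have heq : msg[i + 1] = msg[i] := by rw [← hgi, ← hgi1, h3]
      have hfne : (if msg.getD i "" = "X" then "Q" else "X") ≠ msg[i] := by
        rw [hgi]; split
        · simp_all
        · rename_i hx; exact fun hh => hx hh.symm
      rw [passGo, if_pos h1, if_neg (by omega), if_pos h3, ih,
        insert_decomp msg i _ hi1, heq]
      have key := adjCount_insert (msg.take i) msg[i]
        (if msg.getD i "" = "X" then "Q" else "X") (msg.drop (i + 2)) hfne
      conv_rhs => rw [msg_decomp msg i hi1, heq]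
      omega
  | case3 i msg moved h1 h2 h3 ih =>
      rw [passGo, if_pos h1, if_neg (by omega), if_neg h3]; exact ih
  | case4 i msg moved h1 => simp [passGo, h1]

theorem passGo_mono (len0 i : Nat) (msg : List String) (moved : Nat) :
    moved ≤ (passGo len0 i msg moved).2 := by
  induction i, msg, moved using passGo.induct (len0 := len0) with
  | case1 i msg moved h1 h2 => simp [passGo, h1, h2]
  | case2 i msg moved h1 h2 h3 ih =>
      simp only [dite_eq_ite] at ih
      rw [passGo, if_pos h1, if_neg (by omega), if_pos h3]; omega
  | case3 i msg moved h1 h2 h3 ih =>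
      rw [passGo, if_pos h1, if_neg (by omega), if_neg h3]; exact ih
  | case4 i msg moved h1 => simp [passGo, h1]

-- the normal form both programs compute: expand duplicates with fillers
def expand : List String → List String
  | c :: d :: t =>
      if d = c then c :: (if c = "X" then "Q" else "X") :: expand (d :: t)
      else c :: d :: expand t
  | l => l

-- structural version of B
def alt' : List String → List (List String)
  | [] => []
  | [c] => [[c, "X"]]
  | c :: d :: t =>
      if d = c then [c, if c = "X" then "Q" else "X"] :: alt' (d :: t)
      else [c, d] :: alt' t

-- structural version of the grouping loop (even-length input)
def grpE : List String → List (List String)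
  | a :: b :: t => [a, b] :: grpE t
  | _ => []

-- 'normal' even-length prefixes: consecutive pairs distinct
def normb : List String → Bool
  | [] => true
  | [_] => false
  | a :: b :: t => (a ≠ b : Bool) && normb t

theorem expand_append_of_normb (pre : List String) (h : normb pre = true) (rest : List String) :
    expand (pre ++ rest) = pre ++ expand rest := by
  induction pre using normb.induct with
  | case1 => simp
  | case2 _ => simp [normb] at h
  | case3 a b t ih =>
      simp only [normb, Bool.and_eq_true, decide_eq_true_eq] at h
      simp only [List.cons_append, expand]
      rw [if_neg (by simpa [eq_comm] using h.1)]
      simp [ih h.2]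

theorem normb_append_pair (pre : List String) (h : normb pre = true) (a b : String)
    (hab : a ≠ b) : normb (pre ++ [a, b]) = true := by
  induction pre using normb.induct with
  | case1 => simp [normb, hab]
  | case2 _ => simp [normb] at h
  | case3 x y t ih =>
      simp only [normb, Bool.and_eq_true, decide_eq_true_eq] at h
      simp only [List.cons_append, normb, Bool.and_eq_true, decide_eq_true_eq]
      exact ⟨h.1, ih h.2⟩

theorem expand_short (l : List String) (h : l.length ≤ 1) : expand l = l := by
  match l, h with
  | [], _ => rfl
  | [a], _ => rfl

theorem passGo_expand (len0 i : Nat) (msg : List String) (moved : Nat) :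
    normb (msg.take i) = true → expand (passGo len0 i msg moved).1 = expand msg := by
  induction i, msg, moved using passGo.induct (len0 := len0) with
  | case1 i msg moved h1 h2 => intro _; simp [passGo, h1, h2]
  | case2 i msg moved h1 h2 h3 ih =>
      intro hn
      simp only [dite_eq_ite] at ih
      have hi : i < msg.length := by omega
      have hi1 : i + 1 < msg.length := by omega
      have hgi : msg.getD i "" = msg[i] := List.getD_eq_getElem msg "" hi
      have hgi1 : msg.getD (i + 1) "" = msg[i + 1] := List.getD_eq_getElem msg "" hi1
      have heq : msg[i + 1] = msg[i] := by rw [← hgi, ← hgi1, h3]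
      set f := (if msg.getD i "" = "X" then "Q" else "X") with hfdef
      have hfne : f ≠ msg[i] := by
        rw [hfdef, hgi]; split
        · simp_all
        · rename_i hx; exact fun hh => hx hh.symm
      have hins : PySem.List.insert msg ((i : Int) + 1) f
          = msg.take i ++ msg[i] :: f :: msg[i] :: msg.drop (i + 2) := by
        rw [insert_decomp msg i f hi1, heq]
      have htake_len : (msg.take i).length = i := by simp; omega
      -- normality of the new prefix of length i + 2
      have hn' : normb ((PySem.List.insert msg ((i : Int) + 1) f).take (i + 2)) = true := by
        rw [hins, List.take_append, List.take_of_length_le (by rw [htake_len]; omega),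
          htake_len, (by omega : i + 2 - i = 2)]
        exact normb_append_pair _ hn msg[i] f (Ne.symm hfne)
      have hexp : expand (PySem.List.insert msg ((i : Int) + 1) f) = expand msg := by
        rw [hins]
        conv_rhs => rw [msg_decomp msg i hi1, heq]
        rw [expand_append_of_normb _ hn, expand_append_of_normb _ hn]
        simp only [expand]
        rw [if_neg hfne]
        simp only [if_true]
        rw [← hgi, ← hfdef]
      rw [passGo, if_pos h1, if_neg (by omega), if_pos h3, ih hn', hexp]
  | case3 i msg moved h1 h2 h3 ih =>
      intro hn
      have hi : i < msg.length := by omega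
      have hi1 : i + 1 < msg.length := by omega
      have hgi : msg.getD i "" = msg[i] := List.getD_eq_getElem msg "" hi
      have hgi1 : msg.getD (i + 1) "" = msg[i + 1] := List.getD_eq_getElem msg "" hi1
      rw [passGo, if_pos h1, if_neg (by omega), if_neg h3]
      apply ih
      rw [take_two msg i hi1]
      exact normb_append_pair _ hn _ _ (by rw [← hgi, ← hgi1]; exact h3)
  | case4 i msg moved h1 => intro _; simp [passGo, h1]

theorem passGo_nomove (len0 i : Nat) (msg : List String) (moved : Nat) :
    len0 = msg.length → (passGo len0 i msg moved).2 = moved →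
      (passGo len0 i msg moved).1 = msg ∧ expand (msg.drop i) = msg.drop i := by
  induction i, msg, moved using passGo.induct (len0 := len0) with
  | case1 i msg moved h1 h2 =>
      intro hlen _
      rw [passGo, if_pos h1, if_pos h2]
      exact ⟨rfl, expand_short _ (by rw [List.length_drop]; omega)⟩
  | case2 i msg moved h1 h2 h3 ih =>
      intro hlen hm
      exfalso
      have := passGo_mono len0 (i + 2)
        (PySem.List.insert msg ((i : Int) + 1) (if msg.getD i "" = "X" then "Q" else "X"))
        (moved + 1)
      rw [passGo, if_pos h1, if_neg (by omega), if_pos h3] at hm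
      simp only [dite_eq_ite] at *
      omega
  | case3 i msg moved h1 h2 h3 ih =>
      intro hlen hm
      rw [passGo, if_pos h1, if_neg (by omega), if_neg h3] at hm ⊢
      obtain ⟨hm1, hm2⟩ := ih hlen hm
      refine ⟨hm1, ?_⟩
      have hi : i < msg.length := by omega
      have hi1 : i + 1 < msg.length := by omega
      have hgi : msg.getD i "" = msg[i] := List.getD_eq_getElem msg "" hi
      have hgi1 : msg.getD (i + 1) "" = msg[i + 1] := List.getD_eq_getElem msg "" hi1
      rw [List.drop_eq_getElem_cons hi, List.drop_eq_getElem_cons hi1]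
      simp only [expand]
      rw [if_neg (by rw [← hgi, ← hgi1]; exact fun hh => h3 hh.symm), hm2]
  | case4 i msg moved h1 =>
      intro hlen _
      rw [passGo, if_neg h1]
      exact ⟨rfl, expand_short _ (by rw [List.length_drop]; omega)⟩

theorem whileA_expand (fuel : Nat) (msg : List String) (hf : adjCount msg < fuel) :
    whileA fuel msg = expand msg := by
  induction fuel generalizing msg with
  | zero => omega
  | succ n ih =>
      rw [whileA]
      by_cases h : (passGo msg.length 0 msg 0).2 = 0
      · simp only [h, if_true]
        obtain ⟨h1, h2⟩ := passGo_nomove msg.length 0 msg 0 rfl h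
        rw [h1]
        simpa using h2.symm
      · simp only [h, if_false]
        have hc := passGo_conserve msg.length 0 msg 0
        rw [ih _ (by omega), passGo_expand msg.length 0 msg 0 (by simp [normb])]

theorem padX_cons2 (a b : String) (l : List String) : padX (a :: b :: l) = a :: b :: padX l := by
  unfold padX
  simp only [List.length_cons]
  by_cases h : l.length % 2 = 0
  · rw [if_neg (by omega), if_neg (by omega)]
  · rw [if_pos (by omega), if_pos (by omega)]
    rfl

theorem alt'_eq (l : List String) : alt' l = grpE (padX (expand l)) := by
  induction l using alt'.induct with
  | case1 => rfl
  | case2 c => rfl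
  | case3 d t ih =>
      simp only [alt', expand, if_true, ih, padX_cons2, grpE]
  | case4 c d t hdc ih =>
      simp only [alt', expand, if_neg hdc, padX_cons2, grpE, ih]

theorem altGo_eq (msg : List String) (i : Nat) :
    altGo msg msg.length i = alt' (msg.drop i) := by
  induction i using altGo.induct (message := msg) (n := msg.length) with
  | case1 x hx c hcond ih =>
      have hx1 : x + 1 < msg.length := hcond.1
      have hgx : msg.getD x "" = msg[x] := List.getD_eq_getElem msg "" (by omega)
      have hgx1 : msg.getD (x + 1) "" = msg[x + 1] := List.getD_eq_getElem msg "" hx1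
      have hd : msg[x + 1] = msg[x] := by rw [← hgx, ← hgx1]; exact hcond.2
      rw [altGo]
      simp only [if_pos hx]
      rw [if_pos (show x + 1 < msg.length ∧ msg.getD (x + 1) "" = msg.getD x "" from hcond)]
      rw [List.drop_eq_getElem_cons (by omega : x < msg.length),
        List.drop_eq_getElem_cons hx1]
      simp only [alt']
      rw [if_pos hd, ← List.drop_eq_getElem_cons hx1, ← ih, hgx]
  | case2 x hx c hcond hx1 ih =>
      have hgx : msg.getD x "" = msg[x] := List.getD_eq_getElem msg "" (by omega)
      have hgx1 : msg.getD (x + 1) "" = msg[x + 1] := List.getD_eq_getElem msg "" hx1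
      have hd : ¬ msg[x + 1] = msg[x] := by
        rw [← hgx, ← hgx1]; exact fun hh => hcond ⟨hx1, hh⟩
      rw [altGo]
      simp only [if_pos hx]
      rw [if_neg (show ¬(x + 1 < msg.length ∧ msg.getD (x + 1) "" = msg.getD x "") from hcond),
        if_pos hx1]
      rw [List.drop_eq_getElem_cons (by omega : x < msg.length),
        List.drop_eq_getElem_cons hx1]
      simp only [alt']
      rw [if_neg hd, ← ih, hgx, hgx1]
  | case3 x hx c hcond hx1 ih =>
      have hlast : msg.length = x + 1 := by omega
      have hgx : msg.getD x "" = msg[x] := List.getD_eq_getElem msg "" (by omega)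
      rw [altGo]
      simp only [if_pos hx]
      rw [if_neg (show ¬(x + 1 < msg.length ∧ msg.getD (x + 1) "" = msg.getD x "") from hcond),
        if_neg hx1]
      rw [List.drop_eq_getElem_cons (by omega : x < msg.length),
        (by rw [List.drop_eq_nil_iff]; omega : msg.drop (x + 1) = [])]
      simp only [alt']
      rw [hgx, ih, (by rw [List.drop_eq_nil_iff]; omega : msg.drop (x + 1) = [])]
      rfl
  | case4 x hx =>
      rw [altGo, if_neg hx, (by rw [List.drop_eq_nil_iff]; omega : msg.drop x = [])]
      rfl

theorem groupGo_eq (m : List String) (hm : m.length % 2 = 0) (i : Nat) (hi : i % 2 = 0) :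
    groupGo m i = grpE (m.drop i) := by
  revert hi
  induction i using groupGo.induct (m := m) with
  | case1 x hx ih =>
      intro hi
      have hx1 : x + 1 < m.length := by omega
      have hgx : m.getD x "" = m[x] := List.getD_eq_getElem m "" (by omega)
      have hgx1 : m.getD (x + 1) "" = m[x + 1] := List.getD_eq_getElem m "" hx1
      rw [groupGo, if_pos hx, List.drop_eq_getElem_cons (by omega : x < m.length),
        List.drop_eq_getElem_cons hx1]
      simp only [grpE]
      rw [ih (by omega), hgx, hgx1]
  | case2 x hx =>
      intro _
      rw [groupGo, if_neg hx, (by rw [List.drop_eq_nil_iff]; omega : m.drop x = [])]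
      rfl

theorem padX_even (l : List String) : (padX l).length % 2 = 0 := by
  unfold padX
  split
  · simp only [List.length_append, List.length_cons, List.length_nil]; omega
  · omega

-- ===== VERDICT (by name: the statement is the Claim_ definition above) =====
theorem message_split_spec : Claim_equal_message_split := by
  intro message _
  unfold Spec_message_split message_split message_split_alt
  rw [whileA_expand _ _ (Nat.lt_succ_self _), groupGo_eq _ (padX_even _) 0 rfl, altGo_eq]
  simp [alt'_eq]
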